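-- pv_equiv track=rewrite | github.com/haegomm/Algorithm | 프로그래머스/2/132265. 롤케이크 자르기/롤케이크 자르기.py | solution
-- ===== SOURCE A (Python) =====
-- def solution(topping):
--
--     answer = 0
--     n = len(topping)
--
--     left = [0] * n
--     right = [0] * n
--
--     seen = set()
--     for i in range(n):
--         seen.add(topping[i])
--         left[i] = len(seen)
--
--     seen.clear()
--     for i in range(n - 1, -1, -1):
--         seen.add(topping[i])
--         right[i] = len(seen)
--
--     for i in range(n-1):
--         if left[i] == right[i+1]:
--             answer += 1
--
--     return answer
-- ===== SOURCE B (Python) =====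
-- def solution(topping):
--     # one incremental sweep: left = set of toppings given away so far,
--     # right = dict counting the remaining toppings (key removed at count 0)
--     right = {}
--     for t in topping:
--         right[t] = right.get(t, 0) + 1
--     left = set()
--     answer = 0
--     for t in topping[:-1]:
--         left.add(t)
--         c = right[t] - 1
--         if c == 0:
--             del right[t]
--         else:
--             right[t] = c
--         if len(left) == len(right):
--             answer += 1
--     return answer
-- ===== Notes on version B (the rewrite author's own statement) =====
-- stated objective: idiomatic
-- what changed: Replaces the two precomputed prefix/suffix distinct-count arrays and a third comparison pass by a single incremental sweep that maintains a 'left' set and a 'right' count dict (deleting keys at count 0) and compares their live sizes at each cut.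
import Mathlib
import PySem

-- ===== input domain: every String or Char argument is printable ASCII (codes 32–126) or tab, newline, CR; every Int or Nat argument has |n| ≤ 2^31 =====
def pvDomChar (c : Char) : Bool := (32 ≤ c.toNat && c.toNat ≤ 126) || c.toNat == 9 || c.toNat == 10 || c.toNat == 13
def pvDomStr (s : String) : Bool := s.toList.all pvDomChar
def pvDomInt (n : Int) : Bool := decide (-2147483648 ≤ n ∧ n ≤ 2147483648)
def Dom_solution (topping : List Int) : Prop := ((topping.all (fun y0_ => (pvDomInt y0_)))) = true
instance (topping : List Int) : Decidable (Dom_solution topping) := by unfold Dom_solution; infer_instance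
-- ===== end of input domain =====

-- B replaces A's two precomputed prefix/suffix distinct-count arrays and third comparison
-- pass by a single incremental sweep maintaining a left set and a right counter dict (idiomatic).


-- ===== PORT A =====
-- literal port of A: two index-range fill loops into [0]*n arrays, then a comparison loop.
-- topping[i] is always in range inside these loops, so pyGetD with default 0 is exact here.
def fillStep (topping : List Int) (st : PySem.Set Int × List Int) (i : Int) : PySem.Set Int × List Int :=
  let seen := PySem.Set.add st.1 (PySem.List.pyGetD topping i 0)
  (seen, st.2.set i.toNat (seen.length : Int))

-- distinct count of a list = length of its PySem set

def solution (topping : List Int) : Int :=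
  let n : Nat := topping.length
  let left0 : List Int := List.replicate n 0
  let right0 : List Int := List.replicate n 0
  let left := ((PySem.List.pyRange 0 (n : Int)).foldl (fillStep topping)
    (PySem.Set.empty, left0)).2
  let right := ((PySem.List.pyRange ((n : Int) - 1) (-1) (-1)).foldl (fillStep topping)
    (PySem.Set.empty, right0)).2
  (PySem.List.pyRange 0 ((n : Int) - 1)).foldl
    (fun (answer : Int) i =>
      if PySem.List.pyGetD left i 0 = PySem.List.pyGetD right (i + 1) 0 then answer + 1 else answer)
    0

-- ===== PORT B =====
-- literal port of Source B: build the count dict in one fold, then a single sweep over topping[:-1]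
-- maintaining the left set, the right dict (key deleted at count 0) and the answer.
def sweepStep (st : PySem.Set Int × PySem.Dict Int Int × Int) (t : Int) :
    PySem.Set Int × PySem.Dict Int Int × Int :=
  let left := PySem.Set.add st.1 t
  let c := st.2.1.getD t 0 - 1
  let right := if c = 0 then st.2.1.erase t else st.2.1.insert t c
  let answer := if left.length = right.size then st.2.2 + 1 else st.2.2
  (left, right, answer)

def solution_alt (topping : List Int) : Int :=
  let right0 : PySem.Dict Int Int :=
    topping.foldl (fun d t => d.insert t (d.getD t 0 + 1)) PySem.Dict.empty
  ((PySem.List.slice topping none (some (-1))).foldl sweepStep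
    (PySem.Set.empty, right0, 0)).2.2

-- ===== PRECONDITION & SPEC =====
def Spec_solution (topping : List Int) (out : Int) : Prop := out = solution_alt topping
instance (topping : List Int) (out : Int) : Decidable (Spec_solution topping out) := by unfold Spec_solution; infer_instance

-- ===== CLAIM (what is proved, stated in full; the proofs are below) =====
def Claim_equal_solution : Prop := ∀ (topping : List Int), Dom_solution topping → Spec_solution topping (solution topping)

-- ===== LEMMAS AND PROOFS =====

lemma card_ofList (xs : List Int) : (PySem.Set.ofList xs).length = xs.toFinset.card := by
  rw [← List.toFinset_card_of_nodup (PySem.Set.nodup_ofList xs)]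
  congr 1
  ext t
  simp [PySem.Set.mem_ofList]

lemma ofList_concat (l : List Int) (x : Int) :
    PySem.Set.ofList (l ++ [x]) = PySem.Set.add (PySem.Set.ofList l) x := by
  simp [PySem.Set.ofList_eq_foldl, List.foldl_append]

lemma map_range_getD_self (R : List Int) :
    (List.range R.length).map (fun j => R.getD j 0) = R := by
  apply List.ext_getElem
  · simp
  · intro i h1 h2
    simp [List.getD_eq_getElem?_getD, List.getElem?_eq_getElem h2]

lemma set_map_range (f : Nat → Int) (n m : Nat) (v : Int) :
    ((List.range n).map f).set m v = (List.range n).map (fun j => if j = m then v else f j) := by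
  apply List.ext_getElem
  · simp
  · intro i h1 h2
    simp only [List.getElem_set, List.getElem_map, List.getElem_range]
    simp at h1
    by_cases h : m = i <;> simp [h] ; omega

def gL (xs : List Int) (j : Nat) : Int := ((xs.take (j+1)).toFinset.card : Int)

def gR (xs : List Int) (j : Nat) : Int := ((xs.drop j).toFinset.card : Int)

lemma leftFoldAux (xs : List Int) : ∀ m, m ≤ xs.length →
    (List.range m).foldl (fun st (k : Nat) => fillStep xs st (k : Int))
      (PySem.Set.empty, List.replicate xs.length 0)
    = (PySem.Set.ofList (xs.take m),
       (List.range xs.length).map (fun j => if j < m then gL xs j else 0)) := by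
  intro m
  induction m with
  | zero =>
    intro _
    simp [PySem.Set.ofList, PySem.Set.empty, List.map_const']
  | succ m ih =>
    intro hm
    have hmlt : m < xs.length := by omega
    rw [List.range_succ, List.foldl_append, ih (by omega)]
    simp only [List.foldl_cons, List.foldl_nil, fillStep]
    have hget : PySem.List.pyGetD xs (m : Int) 0 = xs[m] := by
      rw [PySem.List.pyGetD_natCast, List.getD_eq_getElem xs 0 hmlt]
    have htake : xs.take (m+1) = xs.take m ++ [xs[m]] :=
      List.take_succ_eq_append_getElem hmlt
    rw [hget, Prod.mk.injEq]
    constructor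
    · rw [htake, ofList_concat]
    · rw [Int.toNat_natCast, ← ofList_concat, ← htake,
          set_map_range _ _ _ _]
      apply List.map_congr_left
      intro j hj
      simp only [List.mem_range] at hj
      by_cases h : j = m
      · subst h
        simp [gL, card_ofList]
      · by_cases h2 : j < m <;> simp [h, h2] <;> omega

lemma pyRange_down (n : Nat) :
    PySem.List.pyRange ((n : Int) - 1) (-1) (-1)
    = (List.range n).map (fun (k : Nat) => (n : Int) - 1 - (k : Int)) := by
  simp only [PySem.List.pyRange]
  norm_num
  rcases Nat.eq_zero_or_pos n with h | h
  · subst h; norm_num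
  · rw [if_pos h]
    apply List.map_congr_left
    intro k _
    ring

lemma getD_set_lt (R : List Int) (m j : Nat) (v : Int) (hj : j < R.length) :
    (R.set m v).getD j 0 = if m = j then v else R.getD j 0 := by
  rw [List.getD_eq_getElem _ _ (by simpa using hj), List.getD_eq_getElem _ _ hj, List.getElem_set]

lemma rightFoldAux (xs : List Int) : ∀ m, m ≤ xs.length → ∀ R : List Int, R.length = xs.length →
    ((List.range m).map (fun (k : Nat) => (m : Int) - 1 - (k : Int))).foldl (fillStep xs)
      (PySem.Set.ofList ((xs.drop m).reverse), R)
    = (PySem.Set.ofList xs.reverse,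
       (List.range xs.length).map (fun j => if j < m then gR xs j else R.getD j 0)) := by
  intro m
  induction m with
  | zero =>
    intro _ R hR
    simp only [List.range_zero, List.map_nil, List.foldl_nil, List.drop_zero, Nat.not_lt_zero,
      if_false]
    rw [← hR, map_range_getD_self]
  | succ m ih =>
    intro hm R hR
    have hmlt : m < xs.length := by omega
    have hlist : (List.range (m+1)).map (fun (k : Nat) => ((m:Int) + 1) - 1 - (k : Int))
        = (m : Int) :: (List.range m).map (fun (k : Nat) => (m : Int) - 1 - (k : Int)) := by
      apply List.ext_getElem
      · simp
      · intro i h1 h2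
        cases i with
        | zero => simp
        | succ i =>
          simp only [List.getElem_cons_succ, List.getElem_map, List.getElem_range]
          push_cast
          ring
    have hdrop : xs.drop m = xs[m] :: xs.drop (m+1) := List.drop_eq_getElem_cons hmlt
    have hrev : (xs.drop m).reverse = (xs.drop (m+1)).reverse ++ [xs[m]] := by
      rw [hdrop]; simp
    rw [show (fun (k : Nat) => ((m+1 : Nat) : Int) - 1 - (k : Int))
          = (fun (k : Nat) => ((m : Int) + 1) - 1 - (k : Int)) from by
        funext k; push_cast; ring]
    rw [hlist, List.foldl_cons]
    have hget : PySem.List.pyGetD xs (m : Int) 0 = xs[m] := by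
      rw [PySem.List.pyGetD_natCast, List.getD_eq_getElem xs 0 hmlt]
    simp only [fillStep, hget, Int.toNat_natCast]
    rw [← ofList_concat, ← hrev]
    rw [ih (by omega) (R.set m _) (by simpa using hR)]
    congr 1
    apply List.map_congr_left
    intro j hj
    simp only [List.mem_range] at hj
    rw [getD_set_lt R m j _ (by omega)]
    by_cases h1 : j < m
    · simp [h1, show j < m+1 from by omega]
    · by_cases h2 : j = m
      · subst h2
        simp only [h1, if_false, if_pos (by omega : j < j+1), gR]
        rw [card_ofList]
        simp
      · simp [h1, show ¬ (j < m+1) from by omega, show m ≠ j from by omega]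

def condN (xs : List Int) (k : Nat) : Bool :=
  decide ((xs.take (k+1)).toFinset.card = (xs.drop (k+1)).toFinset.card)

lemma A_eq (xs : List Int) :
    solution xs = ((List.range (xs.length - 1)).countP (condN xs) : Int) := by
  rcases List.eq_nil_or_concat xs with rfl | _
  · decide
  · have hn : 1 ≤ xs.length := by
      rcases xs with _ | _
      · simp_all
      · simp
    have e1 : PySem.List.pyRange 0 (xs.length : Int)
        = (List.range xs.length).map (fun (k : Nat) => (k : Int)) :=
      PySem.List.pyRange_zero_natCast xs.length
    have e3 : PySem.List.pyRange 0 ((xs.length : Int) - 1)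
        = (List.range (xs.length - 1)).map (fun (k : Nat) => (k : Int)) := by
      rw [show ((xs.length : Int) - 1) = ((xs.length - 1 : Nat) : Int) from by push_cast [hn]; ring]
      exact PySem.List.pyRange_zero_natCast _
    simp only [solution]
    have er := rightFoldAux xs xs.length le_rfl (List.replicate xs.length 0) (by simp)
    simp only [List.drop_length, List.reverse_nil] at er
    rw [show (PySem.Set.ofList ([] : List Int)) = PySem.Set.empty from rfl] at er
    rw [e1, e3, pyRange_down, er, List.foldl_map, List.foldl_map]
    rw [leftFoldAux xs xs.length le_rfl]
    have hL : ∀ k, k < xs.length - 1 →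
        PySem.List.pyGetD ((List.range xs.length).map
          (fun j => if j < xs.length then gL xs j else 0)) (k : Int) 0 = gL xs k := by
      intro k hk
      rw [PySem.List.pyGetD_natCast, PySem.List.getD_map_range _ _ _ _ (by omega)]
      simp [show k < xs.length from by omega]
    have hR : ∀ k, k < xs.length - 1 →
        PySem.List.pyGetD ((List.range xs.length).map
          (fun j => if j < xs.length then gR xs j else (List.replicate xs.length (0:Int)).getD j 0))
          ((k : Int) + 1) 0 = gR xs (k+1) := by
      intro k hk
      rw [show ((k : Int) + 1) = ((k+1 : Nat) : Int) from by push_cast; ring,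
          PySem.List.pyGetD_natCast, PySem.List.getD_map_range _ _ _ _ (by omega)]
      simp [show k + 1 < xs.length from by omega]
    simp only
    rw [PySem.List.foldl_congr_mem _ _ (fun (answer : Int) (k : Nat) =>
          if condN xs k = true then answer + 1 else answer) _ ?_]
    · simpa using PySem.List.foldl_count_if (condN xs) (List.range (xs.length - 1)) 0
    · intro a k hk
      simp only [List.mem_range] at hk
      rw [hL k hk, hR k hk]
      simp only [condN, gL, gR, decide_eq_true_eq]
      by_cases h : (xs.take (k+1)).toFinset.card = (xs.drop (k+1)).toFinset.card
      · simp [h]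
      · simp [h, show ¬ ((xs.take (k+1)).toFinset.card : Int) = ((xs.drop (k+1)).toFinset.card : Int) from by exact_mod_cast h]

lemma find_filter_ne (l : List (Int × Int)) (k x : Int) (hx : x ≠ k) :
    (l.filter (fun p => !(p.1 == k))).find? (fun p => p.1 == x)
      = l.find? (fun p => p.1 == x) := by
  induction l with
  | nil => rfl
  | cons p l ih =>
    by_cases hk : p.1 = k
    · have hkx : (k == x) = false := by
        simp only [beq_eq_false_iff_ne]; exact fun h => hx h.symm
      simp [hk, ih, hkx]
    · by_cases hpx : p.1 = x
      · simp [hpx, hx]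
      · simp [hk, hpx, ih]

lemma dict_get?_erase (d : PySem.Dict Int Int) (k x : Int) :
    (d.erase k).get? x = if x = k then none else d.get? x := by
  by_cases hx : x = k
  · subst hx
    simp only [PySem.Dict.erase, PySem.Dict.get?]
    rw [List.find?_eq_none.mpr]
    · rfl
    · intro p hp
      simp only [List.mem_filter] at hp
      simpa using hp.2
  · simp only [PySem.Dict.erase, PySem.Dict.get?, if_neg hx]
    rw [find_filter_ne _ _ _ hx]

lemma nodup_keys_erase (d : PySem.Dict Int Int) (k : Int) (h : d.keys.Nodup) :
    (d.erase k).keys.Nodup := by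
  have : (d.erase k).keys.Sublist d.keys := by
    simp only [PySem.Dict.keys, PySem.Dict.erase]
    exact List.Sublist.map _ List.filter_sublist
  exact h.sublist this

lemma size_from_spec (d : PySem.Dict Int Int) (l : List Int) (hnd : d.keys.Nodup)
    (hspec : ∀ t, d.get? t = if 0 < l.count t then some ((l.count t : Int)) else none) :
    d.size = l.toFinset.card := by
  have hsz : d.size = d.keys.length := by
    simp [PySem.Dict.size, PySem.Dict.keys]
  rw [hsz, ← List.toFinset_card_of_nodup hnd]
  congr 1
  ext t
  simp only [List.mem_toFinset]
  rw [← not_iff_not, ← PySem.Dict.get?_eq_none_iff_not_mem_keys, hspec t, ← List.count_pos_iff]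
  by_cases h : 0 < l.count t <;> simp [h]

lemma counter_spec (xs : List Int) (t : Int) :
    (xs.foldl (fun d t => d.insert t (d.getD t 0 + 1)) PySem.Dict.empty).get? t
      = if 0 < xs.count t then some ((xs.count t : Int)) else none := by
  rw [PySem.Dict.foldl_insert_getD_add_one_eq_counter]
  by_cases h : t ∈ xs
  · have hmem : t ∈ (PySem.Dict.counter xs).keys := by
      rw [PySem.Dict.keys_counter]
      exact (PySem.Set.mem_ofList _ _).mpr h
    have hne : (PySem.Dict.counter xs).get? t ≠ none := by
      rw [ne_eq, PySem.Dict.get?_eq_none_iff_not_mem_keys]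
      simpa using hmem
    obtain ⟨v, hv⟩ := Option.ne_none_iff_exists'.mp hne
    have hg : (PySem.Dict.counter xs).getD t 0 = (xs.count t : Int) :=
      PySem.Dict.getD_counter xs t
    rw [PySem.Dict.getD_eq_get?_getD, hv] at hg
    simp only [Option.getD_some] at hg
    rw [hv, hg, if_pos (List.count_pos_iff.mpr h)]
  · rw [if_neg (by simpa using fun hc => h (List.count_pos_iff.mp hc))]
    rw [PySem.Dict.get?_eq_none_iff_not_mem_keys, PySem.Dict.keys_counter]
    simpa [PySem.Set.mem_ofList] using h

lemma counter_nodup (xs : List Int) :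
    (xs.foldl (fun d t => d.insert t (d.getD t 0 + 1))
      (PySem.Dict.empty : PySem.Dict Int Int)).keys.Nodup := by
  exact PySem.Dict.nodup_keys_foldl_insert xs _ _ (by simp [PySem.Dict.keys_empty])

lemma B_inv (xs : List Int) : ∀ m, m + 1 ≤ xs.length →
    ∃ R : PySem.Dict Int Int,
      (xs.dropLast.take m).foldl sweepStep
        (PySem.Set.empty, xs.foldl (fun d t => d.insert t (d.getD t 0 + 1)) PySem.Dict.empty, 0)
      = (PySem.Set.ofList (xs.take m), R, ((List.range m).countP (condN xs) : Int))
      ∧ R.keys.Nodup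
      ∧ ∀ t, R.get? t
          = if 0 < (xs.drop m).count t then some (((xs.drop m).count t : Int)) else none := by
  intro m
  induction m with
  | zero =>
    intro _
    refine ⟨_, rfl, counter_nodup xs, counter_spec xs⟩
  | succ m ih =>
    intro hm
    obtain ⟨R, hfold, hnd, hspec⟩ := ih (by omega)
    have hmlt : m < xs.length := by omega
    have hmdl : m < xs.dropLast.length := by simp [List.length_dropLast]; omega
    have htake : xs.dropLast.take (m+1) = xs.dropLast.take m ++ [xs[m]] := by
      rw [List.take_succ_eq_append_getElem hmdl, List.getElem_dropLast]
    have htakex : xs.take (m+1) = xs.take m ++ [xs[m]] := List.take_succ_eq_append_getElem hmlt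
    have hdrop : xs.drop m = xs[m] :: xs.drop (m+1) := List.drop_eq_getElem_cons hmlt
    have hcnt : (xs.drop m).count xs[m] = (xs.drop (m+1)).count xs[m] + 1 := by
      rw [hdrop, List.count_cons_self]
    have hcne : ∀ t, t ≠ xs[m] → (xs.drop m).count t = (xs.drop (m+1)).count t := by
      intro t ht
      rw [hdrop, List.count_cons]
      simp only [beq_iff_eq]
      rw [if_neg (show ¬ xs[m] = t from fun h => ht h.symm)]
      omega
    have hgetD : R.getD xs[m] 0 = ((xs.drop m).count xs[m] : Int) := by
      rw [PySem.Dict.getD_eq_get?_getD, hspec xs[m], if_pos (by omega)]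
      rfl
    rw [htake, List.foldl_append, hfold]
    simp only [List.foldl_cons, List.foldl_nil, sweepStep, hgetD]
    have hc : ((xs.drop m).count xs[m] : Int) - 1 = ((xs.drop (m+1)).count xs[m] : Int) := by
      rw [hcnt]; push_cast; ring
    -- the new dict
    set R' := if ((xs.drop m).count xs[m] : Int) - 1 = 0 then R.erase xs[m]
              else R.insert xs[m] (((xs.drop m).count xs[m] : Int) - 1) with hR'
    have hnd' : R'.keys.Nodup := by
      rw [hR']
      by_cases h0 : ((xs.drop m).count xs[m] : Int) - 1 = 0
      · rw [if_pos h0]; exact nodup_keys_erase R xs[m] hnd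
      · rw [if_neg h0]; exact PySem.Dict.nodup_keys_insert R xs[m] _ hnd
    have hspec' : ∀ t, R'.get? t
        = if 0 < (xs.drop (m+1)).count t then some (((xs.drop (m+1)).count t : Int)) else none := by
      intro t
      rw [hR']
      by_cases h0 : ((xs.drop m).count xs[m] : Int) - 1 = 0
      · rw [if_pos h0, dict_get?_erase]
        by_cases ht : t = xs[m]
        · have hz : ((xs.drop (m+1)).count xs[m] : Int) = 0 := by rw [← hc]; exact h0
          have hz' : (xs.drop (m+1)).count xs[m] = 0 := by exact_mod_cast hz
          rw [if_pos ht, ht, if_neg (by omega)]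
        · rw [if_neg ht, hspec t, hcne t ht]
      · rw [if_neg h0, PySem.Dict.get?_insert]
        by_cases ht : t = xs[m]
        · have hnz : ((xs.drop (m+1)).count xs[m] : Int) ≠ 0 := by rw [← hc]; exact h0
          have hpos : 0 < (xs.drop (m+1)).count xs[m] := by omega
          rw [if_pos ht, ht, hc, if_pos hpos]
        · rw [if_neg ht, hspec t, hcne t ht]
    refine ⟨R', ?_, hnd', hspec'⟩
    rw [Prod.mk.injEq, Prod.mk.injEq]
    refine ⟨by rw [← ofList_concat, ← htakex], rfl, ?_⟩
    -- the answer component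
    have hlen : (PySem.Set.add (PySem.Set.ofList (xs.take m)) xs[m]).length
        = (xs.take (m+1)).toFinset.card := by
      rw [← ofList_concat, ← htakex, card_ofList]
    have hsize : R'.size = (xs.drop (m+1)).toFinset.card :=
      size_from_spec R' _ hnd' hspec'
    rw [hlen, hsize, List.range_succ, List.countP_append]
    by_cases h : (xs.take (m+1)).toFinset.card = (xs.drop (m+1)).toFinset.card
    · rw [if_pos h]
      have hcnd : condN xs m = true := by simp [condN, h]
      simp [hcnd]
    · rw [if_neg h]
      have hcnd : condN xs m = false := by simp [condN, h]
      simp [hcnd]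

lemma B_eq (xs : List Int) :
    solution_alt xs = ((List.range (xs.length - 1)).countP (condN xs) : Int) := by
  rcases xs with _ | ⟨a, l⟩
  · decide
  · have hlen : 1 ≤ (a :: l).length := by simp
    obtain ⟨R, hfold, -, -⟩ := B_inv (a :: l) ((a :: l).length - 1) (by omega)
    simp only [solution_alt, PySem.List.slice_to_neg_one]
    rw [show (a :: l).dropLast = (a :: l).dropLast.take ((a :: l).length - 1) from by
          rw [← List.length_dropLast]; exact List.take_length.symm]
    rw [hfold]

theorem solution_eq_alt (xs : List Int) : solution xs = solution_alt xs := by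
  rw [A_eq, B_eq]

-- ===== VERDICT (by name: the statement is the Claim_ definition above) =====
theorem solution_spec : Claim_equal_solution := by
  intro topping _
  exact solution_eq_alt topping
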